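-- pv_equiv track=rewrite | github.com/arpankumarde/veritas | engine/agents/intern.py | _is_academic_topic
-- ===== SOURCE A (Python) =====
-- def _is_academic_topic(topic: str) -> bool:
--     """Detect if a topic would benefit from academic search."""
--     academic_indicators = [
--         "research",
--         "study",
--         "paper",
--         "journal",
--         "scientific",
--         "evidence",
--         "theory",
--         "hypothesis",
--         "experiment",
--         "analysis",
--         "review",
--         "survey",
--         "methodology",
--         "framework",
--         "algorithm",
--         "clinical",
--         "trial",
--         "treatment",
--         "disease",
--         "medical",
--         "mechanism",
--         "model",
--         "simulation",
--         "data",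
--         "statistical",
--         "peer-reviewed",
--         "published",
--         "findings",
--         "literature",
--         "thesis",
--         "dissertation",
--         "academic",
--         "scholar",
--         "university",
--     ]
--     topic_lower = topic.lower()
--     return any(indicator in topic_lower for indicator in academic_indicators)
-- ===== SOURCE B (Python) =====
-- _KW_BY_FIRST = {
--     "r": ["esearch", "eview"],
--     "s": ["tudy", "cientific", "urvey", "imulation", "tatistical", "cholar"],
--     "p": ["aper", "eer-reviewed", "ublished"],
--     "j": ["ournal"],
--     "e": ["vidence", "xperiment"],
--     "t": ["heory", "rial", "reatment", "hesis"],
--     "h": ["ypothesis"],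
--     "a": ["nalysis", "lgorithm", "cademic"],
--     "m": ["ethodology", "edical", "echanism", "odel"],
--     "f": ["ramework", "indings"],
--     "c": ["linical"],
--     "d": ["isease", "ata", "issertation"],
--     "l": ["iterature"],
--     "u": ["niversity"],
-- }
--
--
-- def _is_academic_topic(topic: str) -> bool:
--     """Detect if a topic would benefit from academic search.
--
--     Position-major scan with a first-letter index: walk the lowered topic
--     once; at each position, only keywords starting with that character
--     (looked up in _KW_BY_FIRST) are tested for a match, via their tails."""
--     t = topic.lower()
--     for i, ch in enumerate(t):
--         for rest in _KW_BY_FIRST.get(ch, []):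
--             if t.startswith(rest, i + 1):
--                 return True
--     return False
-- ===== Notes on version B (the rewrite author's own statement) =====
-- stated objective: alternative
-- what changed: B replaces A's keyword-major scan (a full substring search per keyword via 'in') with a single position-major walk over the lowered topic that, at each index, looks the character up in a precomputed dict from first letter to keyword tails and only tests those tails, returning at the first hit.
import Mathlib
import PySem

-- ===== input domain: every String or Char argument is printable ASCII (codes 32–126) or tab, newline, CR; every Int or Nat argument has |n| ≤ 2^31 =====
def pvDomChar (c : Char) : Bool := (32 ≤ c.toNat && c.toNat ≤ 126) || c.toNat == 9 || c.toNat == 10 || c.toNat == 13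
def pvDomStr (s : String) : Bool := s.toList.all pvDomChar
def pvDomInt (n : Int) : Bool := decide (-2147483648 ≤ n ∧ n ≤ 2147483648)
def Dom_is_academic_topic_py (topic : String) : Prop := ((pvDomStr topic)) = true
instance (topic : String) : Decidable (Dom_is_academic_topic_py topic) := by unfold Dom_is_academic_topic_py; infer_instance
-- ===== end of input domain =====

-- B replaces A's keyword-major substring scans with a single position-major walk over the lowered
-- topic using a first-letter index (dict from first character to keyword tails); alternative, same result.

-- ===== PORT A =====
def academicIndicators : List String :=
  ["research", "study", "paper", "journal", "scientific", "evidence",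
   "theory", "hypothesis", "experiment", "analysis", "review", "survey",
   "methodology", "framework", "algorithm", "clinical", "trial",
   "treatment", "disease", "medical", "mechanism", "model", "simulation",
   "data", "statistical", "peer-reviewed", "published", "findings",
   "literature", "thesis", "dissertation", "academic", "scholar",
   "university"]

def is_academic_topic_py (topic : String) : Bool :=
  let topic_lower := PySem.Str.lower topic
  academicIndicators.any (fun indicator => PySem.Str.isIn indicator topic_lower)

-- ===== PORT B =====
-- _KW_BY_FIRST: keyword tails indexed by first character.
def kwByFirst : PySem.Dict Char (List String) :=
  PySem.Dict.ofList
    [('r', ["esearch", "eview"]),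
     ('s', ["tudy", "cientific", "urvey", "imulation", "tatistical", "cholar"]),
     ('p', ["aper", "eer-reviewed", "ublished"]),
     ('j', ["ournal"]),
     ('e', ["vidence", "xperiment"]),
     ('t', ["heory", "rial", "reatment", "hesis"]),
     ('h', ["ypothesis"]),
     ('a', ["nalysis", "lgorithm", "cademic"]),
     ('m', ["ethodology", "edical", "echanism", "odel"]),
     ('f', ["ramework", "indings"]),
     ('c', ["linical"]),
     ('d', ["isease", "ata", "issertation"]),
     ('l', ["iterature"]),
     ('u', ["niversity"])]

-- `t.startswith(rest, i+1)` with 0 ≤ i is exactly `Chars.startswith (t.drop (i+1)) rest` on char lists.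
def is_academic_topic_py_alt (topic : String) : Bool :=
  let t := PySem.Chars.lower topic.toList
  (PySem.List.enumerate t).any (fun p =>
    (kwByFirst.getD p.2 []).any (fun rest =>
      PySem.Chars.startswith (t.drop (p.1 + 1).toNat) rest.toList))

-- ===== PRECONDITION & SPEC =====
def Spec_is_academic_topic_py (topic : String) (out : Bool) : Prop := out = is_academic_topic_py_alt topic
instance (topic : String) (out : Bool) : Decidable (Spec_is_academic_topic_py topic out) := by unfold Spec_is_academic_topic_py; infer_instance

-- ===== CLAIM (what is proved, stated in full; the proofs are below) =====
def Claim_equal_is_academic_topic_py : Prop := ∀ (topic : String), Dom_is_academic_topic_py topic → Spec_is_academic_topic_py topic (is_academic_topic_py topic)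

-- ===== LEMMAS AND PROOFS =====

-- A substring occurs iff some keyword is a prefix of some suffix starting inside t (for nonempty keywords).
theorem isIn_iff_exists_lt (kw t : List Char) (hkw : kw ≠ []) :
    PySem.Chars.isIn kw t = true ↔ ∃ i < t.length, PySem.Chars.startswith (t.drop i) kw = true := by
  rw [← PySem.Chars.exists_prefix_drop_iff_isIn]
  constructor
  · rintro ⟨j, hj⟩
    by_cases h : j < t.length
    · exact ⟨j, h, (PySem.Chars.startswith_iff _ _).2 hj⟩
    · exfalso
      have : t.drop j = [] := List.drop_eq_nil_of_le (by omega)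
      rw [this] at hj
      exact hkw (List.prefix_nil.1 hj)
  · rintro ⟨i, _, hi⟩
    exact ⟨i, (PySem.Chars.startswith_iff _ _).1 hi⟩

theorem sw_cons (c : Char) (s : List Char) (k : Char) (ks : List Char) :
    PySem.Chars.startswith (c :: s) (k :: ks) = ((k == c) && PySem.Chars.startswith s ks) := by
  rw [Bool.eq_iff_iff]
  simp [PySem.Chars.startswith_iff, List.cons_prefix_cons, Bool.and_eq_true]

-- The grouped first-letter index checks the same set of keywords at one position.
set_option maxHeartbeats 4000000 in
theorem group_eq (ch : Char) (s : List Char) :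
    academicIndicators.any (fun kw => PySem.Chars.startswith (ch :: s) kw.toList) =
    (kwByFirst.getD ch []).any (fun rest => PySem.Chars.startswith s rest.toList) := by
  have h0 : "research".toList = 'r' :: "esearch".toList := rfl
  have h1 : "study".toList = 's' :: "tudy".toList := rfl
  have h2 : "paper".toList = 'p' :: "aper".toList := rfl
  have h3 : "journal".toList = 'j' :: "ournal".toList := rfl
  have h4 : "scientific".toList = 's' :: "cientific".toList := rfl
  have h5 : "evidence".toList = 'e' :: "vidence".toList := rfl
  have h6 : "theory".toList = 't' :: "heory".toList := rfl
  have h7 : "hypothesis".toList = 'h' :: "ypothesis".toList := rfl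
  have h8 : "experiment".toList = 'e' :: "xperiment".toList := rfl
  have h9 : "analysis".toList = 'a' :: "nalysis".toList := rfl
  have h10 : "review".toList = 'r' :: "eview".toList := rfl
  have h11 : "survey".toList = 's' :: "urvey".toList := rfl
  have h12 : "methodology".toList = 'm' :: "ethodology".toList := rfl
  have h13 : "framework".toList = 'f' :: "ramework".toList := rfl
  have h14 : "algorithm".toList = 'a' :: "lgorithm".toList := rfl
  have h15 : "clinical".toList = 'c' :: "linical".toList := rfl
  have h16 : "trial".toList = 't' :: "rial".toList := rfl
  have h17 : "treatment".toList = 't' :: "reatment".toList := rfl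
  have h18 : "disease".toList = 'd' :: "isease".toList := rfl
  have h19 : "medical".toList = 'm' :: "edical".toList := rfl
  have h20 : "mechanism".toList = 'm' :: "echanism".toList := rfl
  have h21 : "model".toList = 'm' :: "odel".toList := rfl
  have h22 : "simulation".toList = 's' :: "imulation".toList := rfl
  have h23 : "data".toList = 'd' :: "ata".toList := rfl
  have h24 : "statistical".toList = 's' :: "tatistical".toList := rfl
  have h25 : "peer-reviewed".toList = 'p' :: "eer-reviewed".toList := rfl
  have h26 : "published".toList = 'p' :: "ublished".toList := rfl
  have h27 : "findings".toList = 'f' :: "indings".toList := rfl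
  have h28 : "literature".toList = 'l' :: "iterature".toList := rfl
  have h29 : "thesis".toList = 't' :: "hesis".toList := rfl
  have h30 : "dissertation".toList = 'd' :: "issertation".toList := rfl
  have h31 : "academic".toList = 'a' :: "cademic".toList := rfl
  have h32 : "scholar".toList = 's' :: "cholar".toList := rfl
  have h33 : "university".toList = 'u' :: "niversity".toList := rfl
  simp only [academicIndicators, kwByFirst, PySem.Dict.ofList, PySem.Dict.update, List.foldl,
    PySem.Dict.getD_insert, PySem.Dict.getD_empty, List.any_cons, List.any_nil,
    h0, h1, h2, h3, h4, h5, h6, h7, h8, h9, h10, h11, h12, h13, h14, h15, h16, h17, h18, h19, h20, h21, h22, h23, h24, h25, h26, h27, h28, h29, h30, h31, h32, h33, sw_cons]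
  by_cases c1 : ch = 'u'
  · subst c1; rfl
  rw [if_neg c1]
  by_cases c2 : ch = 'l'
  · subst c2; rfl
  rw [if_neg c2]
  by_cases c3 : ch = 'd'
  · subst c3; rfl
  rw [if_neg c3]
  by_cases c4 : ch = 'c'
  · subst c4; rfl
  rw [if_neg c4]
  by_cases c5 : ch = 'f'
  · subst c5; rfl
  rw [if_neg c5]
  by_cases c6 : ch = 'm'
  · subst c6; rfl
  rw [if_neg c6]
  by_cases c7 : ch = 'a'
  · subst c7; rfl
  rw [if_neg c7]
  by_cases c8 : ch = 'h'
  · subst c8; rfl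
  rw [if_neg c8]
  by_cases c9 : ch = 't'
  · subst c9; rfl
  rw [if_neg c9]
  by_cases c10 : ch = 'e'
  · subst c10; rfl
  rw [if_neg c10]
  by_cases c11 : ch = 'j'
  · subst c11; rfl
  rw [if_neg c11]
  by_cases c12 : ch = 'p'
  · subst c12; rfl
  rw [if_neg c12]
  by_cases c13 : ch = 's'
  · subst c13; rfl
  rw [if_neg c13]
  by_cases c14 : ch = 'r'
  · subst c14; rfl
  rw [if_neg c14]
  have e1 : ('u' == ch) = false := beq_eq_false_iff_ne.mpr (Ne.symm c1)
  have e2 : ('l' == ch) = false := beq_eq_false_iff_ne.mpr (Ne.symm c2)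
  have e3 : ('d' == ch) = false := beq_eq_false_iff_ne.mpr (Ne.symm c3)
  have e4 : ('c' == ch) = false := beq_eq_false_iff_ne.mpr (Ne.symm c4)
  have e5 : ('f' == ch) = false := beq_eq_false_iff_ne.mpr (Ne.symm c5)
  have e6 : ('m' == ch) = false := beq_eq_false_iff_ne.mpr (Ne.symm c6)
  have e7 : ('a' == ch) = false := beq_eq_false_iff_ne.mpr (Ne.symm c7)
  have e8 : ('h' == ch) = false := beq_eq_false_iff_ne.mpr (Ne.symm c8)
  have e9 : ('t' == ch) = false := beq_eq_false_iff_ne.mpr (Ne.symm c9)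
  have e10 : ('e' == ch) = false := beq_eq_false_iff_ne.mpr (Ne.symm c10)
  have e11 : ('j' == ch) = false := beq_eq_false_iff_ne.mpr (Ne.symm c11)
  have e12 : ('p' == ch) = false := beq_eq_false_iff_ne.mpr (Ne.symm c12)
  have e13 : ('s' == ch) = false := beq_eq_false_iff_ne.mpr (Ne.symm c13)
  have e14 : ('r' == ch) = false := beq_eq_false_iff_ne.mpr (Ne.symm c14)
  simp only [e1, e2, e3, e4, e5, e6, e7, e8, e9, e10, e11, e12, e13, e14,
    Bool.false_and, Bool.or_false, List.any_nil]

theorem main_eq (t : List Char) :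
    academicIndicators.any (fun kw => PySem.Chars.isIn kw.toList t) =
    (PySem.List.enumerate t).any (fun p =>
      (kwByFirst.getD p.2 []).any (fun rest =>
        PySem.Chars.startswith (t.drop (p.1 + 1).toNat) rest.toList)) := by
  have hgroup : ∀ (i : Nat) (hi : i < t.length),
      (academicIndicators.any fun kw => PySem.Chars.startswith (t.drop i) kw.toList) =
      ((kwByFirst.getD (t[i]'hi) []).any
        (fun rest => PySem.Chars.startswith (t.drop (i + 1)) rest.toList)) := by
    intro i hi
    rw [List.drop_eq_getElem_cons hi, group_eq]
  rw [Bool.eq_iff_iff]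
  simp only [List.any_eq_true]
  have hne : ∀ kw ∈ academicIndicators, kw.toList ≠ [] := by decide
  constructor
  · rintro ⟨kw, hkw, hin⟩
    obtain ⟨i, hi, hs⟩ := (isIn_iff_exists_lt _ _ (hne kw hkw)).1 hin
    refine ⟨((i : Int), t[i]), (PySem.List.mem_enumerate_iff _ _ _).2 ⟨i, hi, by simp⟩, ?_⟩
    have h1 : (((i : Int)) + 1).toNat = i + 1 := by omega
    simp only [h1]
    rw [← List.any_eq_true, ← hgroup i hi, List.any_eq_true]
    exact ⟨kw, hkw, hs⟩
  · rintro ⟨p, hp, hany⟩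
    obtain ⟨k, hk, rfl⟩ := (PySem.List.mem_enumerate_iff _ _ _).1 hp
    have h1 : ((0 + (k : Int)) + 1).toNat = k + 1 := by omega
    simp only [h1] at hany
    rw [← List.any_eq_true, ← hgroup k hk, List.any_eq_true] at hany
    obtain ⟨kw, hkw, hs⟩ := hany
    exact ⟨kw, hkw, (isIn_iff_exists_lt _ _ (hne kw hkw)).2 ⟨k, hk, hs⟩⟩

-- ===== VERDICT (by name: the statement is the Claim_ definition above) =====
theorem is_academic_topic_py_spec : Claim_equal_is_academic_topic_py := by
  intro topic _
  unfold Spec_is_academic_topic_py is_academic_topic_py is_academic_topic_py_alt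
  simp only [PySem.Str.isIn_eq, PySem.Str.toList_lower]
  exact main_eq (PySem.Chars.lower topic.toList)
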